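-- pv_equiv track=rewrite | github.com/shavak/advent_of_code | Day_17/Day_17.py | x_trajectory
-- ===== SOURCE A (Python) =====
-- def x_trajectory(u, k):
--     if u < 0:
--         return -x_trajectory(-u, k)
--     if u == 0:
--         return 0
--     x = 0
--     for _ in range(k):
--         x += u
--         u -= (1 if u != 0 else 0)
--     return x
-- ===== SOURCE B (Python) =====
-- def x_trajectory(u, k):
--     s = -1 if u < 0 else 1
--     a = abs(u)
--     m = min(k, a)
--     if m < 0:
--         m = 0
--     return s * (m * a - m * (m - 1) // 2)
-- ===== Notes on version B (the rewrite author's own statement) =====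
-- stated objective: faster
-- what changed: Replaces the k-step simulation loop (add velocity, decelerate toward 0) by the closed-form arithmetic-series formula m*|u| - m*(m-1)//2 with m = max(0, min(k, |u|)), applied with the sign of u.
import Mathlib
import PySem

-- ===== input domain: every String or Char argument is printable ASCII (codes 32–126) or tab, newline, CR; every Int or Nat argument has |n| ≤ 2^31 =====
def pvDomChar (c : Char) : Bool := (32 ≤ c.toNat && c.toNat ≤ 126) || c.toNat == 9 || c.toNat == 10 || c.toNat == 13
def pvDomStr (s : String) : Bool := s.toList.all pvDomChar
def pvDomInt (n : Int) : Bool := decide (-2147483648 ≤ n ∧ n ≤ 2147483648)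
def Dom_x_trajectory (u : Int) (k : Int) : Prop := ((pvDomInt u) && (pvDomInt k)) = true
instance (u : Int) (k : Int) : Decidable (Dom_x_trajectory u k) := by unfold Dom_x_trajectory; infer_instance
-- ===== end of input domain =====

-- B replaces A's O(k) simulation loop by the O(1) closed-form arithmetic series capped at min(k,|u|).

-- ===== PORT A =====
-- the loop body of A: for _ in range(k): x += u; u -= (1 if u != 0 else 0)
def xloop : Nat → Int → Int → Int
  | 0, x, _ => x
  | n + 1, x, u => xloop n (x + u) (u - (if u ≠ 0 then 1 else 0))

-- A on the u ≥ 0 path (the u < 0 branch calls this with -u, which is > 0)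
def x_traj_nonneg (u : Int) (k : Int) : Int :=
  if u = 0 then 0 else xloop k.toNat 0 u

def x_trajectory (u : Int) (k : Int) : Int :=
  if u < 0 then -x_traj_nonneg (-u) k else x_traj_nonneg u k

-- ===== PORT B =====
def x_trajectory_alt (u : Int) (k : Int) : Int :=
  let s : Int := if u < 0 then -1 else 1
  let a : Int := |u|
  let m0 : Int := min k a
  let m : Int := if m0 < 0 then 0 else m0
  s * (m * a - PySem.Int.floordiv (m * (m - 1)) 2)

-- ===== PRECONDITION & SPEC =====
def Spec_x_trajectory (u : Int) (k : Int) (out : Int) : Prop := out = x_trajectory_alt u k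
instance (u : Int) (k : Int) (out : Int) : Decidable (Spec_x_trajectory u k out) := by unfold Spec_x_trajectory; infer_instance

-- ===== CLAIM (what is proved, stated in full; the proofs are below) =====
def Claim_equal_x_trajectory : Prop := ∀ (u : Int) (k : Int), Dom_x_trajectory u k → Spec_x_trajectory u k (x_trajectory u k)

-- ===== LEMMAS AND PROOFS =====

-- loop invariant: twice the accumulated distance is the arithmetic series m*(2u-m+1), m = min n u
theorem xloop_eq (n : Nat) : ∀ (x u : Int), 0 ≤ u →
    2 * xloop n x u = 2 * x + (min (n : Int) u) * (2 * u - (min (n : Int) u) + 1) := by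
  induction n with
  | zero =>
    intro x u hu
    have h0 : min ((0 : Nat) : Int) u = 0 := by push_cast; omega
    rw [h0]
    simp [xloop]
  | succ n ih =>
    intro x u hu
    by_cases h : u = 0
    · subst h
      have step : xloop (n + 1) x 0 = xloop n x 0 := by simp [xloop]
      have h0 : min ((n : Int)) (0 : Int) = 0 := by omega
      have h1 : min (((n + 1 : Nat)) : Int) (0 : Int) = 0 := by push_cast; omega
      rw [step, ih x 0 le_rfl, h0, h1]
    · have hpos : 0 < u := lt_of_le_of_ne hu (Ne.symm h)
      have step : xloop (n + 1) x u = xloop n (x + u) (u - 1) := by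
        simp [xloop, h]
      have hm : min ((n : Int)) (u - 1) = min (((n + 1 : Nat)) : Int) u - 1 := by
        push_cast; omega
      have := ih (x + u) (u - 1) (by omega)
      rw [step, this, hm]
      ring

theorem floordiv_two_mul (a : Int) : PySem.Int.floordiv (2 * a) 2 = a := by
  have := PySem.Int.floordiv_eq_ediv_of_pos (a := 2 * a) (b := 2) (by norm_num)
  omega

-- the closed form for the nonnegative-velocity path
theorem nonneg_eq (u k : Int) (hu : 0 ≤ u) :
    x_traj_nonneg u k =
      (if min k u < 0 then 0 else min k u) * u -
        PySem.Int.floordiv ((if min k u < 0 then 0 else min k u) *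
          ((if min k u < 0 then 0 else min k u) - 1)) 2 := by
  set m : Int := if min k u < 0 then 0 else min k u with hmdef
  have hm1 : m = min ((k.toNat : Int)) u := by
    simp only [hmdef]; omega
  by_cases h : u = 0
  · subst h
    have : m = 0 := by omega
    simp [x_traj_nonneg, this, PySem.Int.floordiv]
  · have hx := xloop_eq k.toNat 0 u hu
    rw [← hm1] at hx
    have hser : m * (m - 1) = 2 * (m * u - xloop k.toNat 0 u) := by ring_nf; ring_nf at hx; omega
    have : x_traj_nonneg u k = xloop k.toNat 0 u := by simp [x_traj_nonneg, h]
    rw [this, hser, floordiv_two_mul]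
    ring

-- ===== VERDICT (by name: the statement is the Claim_ definition above) =====
theorem x_trajectory_spec : Claim_equal_x_trajectory := by
  intro u k _
  unfold Spec_x_trajectory x_trajectory x_trajectory_alt
  by_cases hneg : u < 0
  · have habs : |u| = -u := abs_of_neg hneg
    simp only [hneg, if_true, habs]
    rw [nonneg_eq (-u) k (by omega)]
    ring
  · have habs : |u| = u := abs_of_nonneg (by omega)
    simp only [hneg, if_false, habs]
    rw [nonneg_eq u k (by omega)]
    ring
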